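-- pv_equiv track=rewrite | github.com/zer0eat/Algorithm | 241004_1_회문_BOJ14561/241004_회문_BOJ14561.py | solution
-- ===== SOURCE A (Python) =====
-- def solution(n, q):
--     lst = {10 : 'A', 11 : 'B', 12 : 'C', 13 : 'D', 14 : 'E', 15 : 'F'}  # 11진수 이상일 때 변환되는 값을 딕셔너리로 생성한다
--     rev_base = ''                       # 변환된 값을 저장할 변수를 생성하고
--     while n > 0:                        # 양수라면
--         n, mod = divmod(n, q)           # n을 q로 나눈 몫과 나머지를 구해서
--         if mod > 9:                     # 나머지가 9보다 크면
--             mod = lst[mod]              # 대응되는 값으로 나머지를 변경하고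
--         rev_base += str(mod)            # 나머지를 저장한다
--     return rev_base[::-1] , rev_base    # q진수로 변환된 값과 뒤집어진 값을 리턴한다
-- ===== SOURCE B (Python) =====
-- def solution(n, q):
--     def conv(m):
--         if m <= 0:
--             return ''
--         r = m % q
--         d = 'ABCDEF'[r - 10] if r > 9 else str(r)
--         return conv(m // q) + d
--
--     normal = conv(n)
--     return normal, normal[::-1]
-- ===== Notes on version B (the rewrite author's own statement) =====
-- stated objective: alternative
-- what changed: Replaces the LSB-first while-loop accumulating a reversed string (reversed at the end) with a recursion over n//q that builds the most-significant-first string directly, and replaces the remainder dict with indexing into the string 'ABCDEF'.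
-- outside the precondition, e.g. on solution(5, -3): A returns ('1-', '-1'), B returns ('-1', '1-')
import Mathlib
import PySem

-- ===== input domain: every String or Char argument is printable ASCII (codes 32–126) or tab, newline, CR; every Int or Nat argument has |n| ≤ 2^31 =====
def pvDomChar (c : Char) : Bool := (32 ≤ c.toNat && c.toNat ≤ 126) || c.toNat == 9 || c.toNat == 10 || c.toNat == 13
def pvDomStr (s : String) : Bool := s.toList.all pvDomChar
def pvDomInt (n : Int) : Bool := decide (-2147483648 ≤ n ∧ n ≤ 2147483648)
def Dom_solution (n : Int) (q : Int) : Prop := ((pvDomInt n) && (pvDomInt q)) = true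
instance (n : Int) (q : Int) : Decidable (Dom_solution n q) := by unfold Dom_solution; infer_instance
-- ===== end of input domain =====

-- B replaces A's LSB-first accumulation loop (reversed at the end) by a recursion over n//q that
-- builds the most-significant-first string directly, with 'ABCDEF' string indexing instead of the
-- dict; objective: alternative decomposition, same cost.

-- ===== PORT A =====
-- the dict literal 'lst' of A
def baseDict : PySem.Dict Int String :=
  PySem.Dict.ofList [(10, "A"), (11, "B"), (12, "C"), (13, "D"), (14, "E"), (15, "F")]

-- the 'while n > 0' loop; fuel only makes it total (inside Pre_ the loop terminates within fuel).
-- 'lst[mod]' raises KeyError when the key is missing; that happens only outside Pre_, so the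
-- port's .getD "" default is never reached inside the claim.
def solutionLoop (q : Int) : Nat → Int → String → String
  | 0, _, acc => acc
  | fuel + 1, n, acc =>
    if n > 0 then
      let n' := PySem.Int.floordiv n q          -- n, mod = divmod(n, q)
      let m := PySem.Int.mod n q
      let d := if m > 9 then (baseDict.get? m).getD "" else PySem.Int.toStr m
      solutionLoop q fuel n' (acc ++ d)         -- rev_base += str(mod)
    else acc

def solution (n : Int) (q : Int) : String × String :=
  let rev := solutionLoop q (n.toNat + 1) n ""
  (((PySem.Str.slice? rev none none (-1)).getD ""), rev)   -- rev_base[::-1], rev_base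

-- ===== PORT B =====
-- 'conv', a recursion over m // q building the most-significant-first character list; fuel only
-- makes it total. ''ABCDEF'[r-10]' raises IndexError outside the range of the string; that happens
-- only outside Pre_, so the port's [] default is never reached inside the claim.
def convAlt (q : Int) : Nat → Int → List Char
  | 0, _ => []
  | fuel + 1, m =>
    if m ≤ 0 then []
    else
      let r := PySem.Int.mod m q                          -- r = m % q
      let d : List Char :=
        if r > 9 then
          match PySem.Str.pyGet? "ABCDEF" (r - 10) with   -- 'ABCDEF'[r - 10]
          | some c => [c]
          | none => []
        else (PySem.Int.toStr r).toList                    -- str(r)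
      convAlt q fuel (PySem.Int.floordiv m q) ++ d         -- conv(m // q) + d

def solution_alt (n : Int) (q : Int) : String × String :=
  let normal := convAlt q (n.toNat + 1) n
  (String.ofList normal, String.ofList normal.reverse)     -- normal, normal[::-1]

-- ===== PRECONDITION & SPEC =====
-- Pre_ excludes, for n > 0: q = 0 (A raises ZeroDivisionError), q = 1 (A loops forever), q < 0
-- (an unspecified corner: a negative base yields negative multi-character 'digits' like '-1', and
-- A's character-wise reversal and B's digit order are two equally accidental strings there), and
-- any input one of whose base-q digits exceeds 15 (A raises KeyError on it).
def Pre_solution (n : Int) (q : Int) : Prop :=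
  n ≤ 0 ∨ (2 ≤ q ∧ ((Nat.digits q.toNat n.toNat).all (fun d => d ≤ 15)) = true)
instance (n : Int) (q : Int) : Decidable (Pre_solution n q) := by unfold Pre_solution; infer_instance
def pvWitness_solution : Int × Int := (2024, 16)

def Spec_solution (n : Int) (q : Int) (out : String × String) : Prop := out = solution_alt n q
instance (n : Int) (q : Int) (out : String × String) : Decidable (Spec_solution n q out) := by unfold Spec_solution; infer_instance

-- ===== CLAIM (what is proved, stated in full; the proofs are below) =====
def Claim_equal_solution : Prop := ∀ (n : Int) (q : Int), Dom_solution n q → Pre_solution n q → Spec_solution n q (solution n q)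

-- ===== LEMMAS AND PROOFS =====

-- the loop's accumulator splits off
theorem solutionLoop_acc (q : Int) : ∀ (fuel : Nat) (n : Int) (acc : String),
    solutionLoop q fuel n acc = acc ++ solutionLoop q fuel n "" := by
  intro fuel
  induction fuel with
  | zero => intro n acc; simp [solutionLoop]
  | succ fuel ih =>
    intro n acc
    by_cases h : n > 0
    · simp only [solutionLoop, if_pos h]
      rw [ih _ (acc ++ _), ih _ ("" ++ _)]
      simp [String.append_assoc]
    · simp [solutionLoop, h]

-- lookups past the last mapped remainder fail in both ports: the dict has no key above 15
theorem dict_get?_eq_none (r : Int) (hr : 15 < r) : baseDict.get? r = none := by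
  have hb : baseDict = PySem.Dict.mk [(10, "A"), (11, "B"), (12, "C"), (13, "D"), (14, "E"), (15, "F")] := by decide
  simp [hb, PySem.Dict.get?,
    show (10 : Int) ≠ r by omega, show (11 : Int) ≠ r by omega, show (12 : Int) ≠ r by omega,
    show (13 : Int) ≠ r by omega, show (14 : Int) ≠ r by omega, show (15 : Int) ≠ r by omega]

-- and 'ABCDEF'[r-10] is out of range
theorem str_get?_eq_none (r : Int) (hr : 15 < r) : PySem.Str.pyGet? "ABCDEF" (r - 10) = none := by
  have : PySem.Str.pyGet? "ABCDEF" (r - 10) = PySem.List.pyGet? "ABCDEF".toList (r - 10) := by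
    simp [PySem.Str.pyGet?]
  rw [this, PySem.List.pyGet?_eq_none_iff]
  simp [PySem.Raise.InRange]
  omega

-- the two ports produce the same character list for each remainder r ≥ 0
theorem digit_lists_eq (r : Int) (h0 : 0 ≤ r) :
    ((if r > 9 then (baseDict.get? r).getD "" else PySem.Int.toStr r)).toList
      = (if r > 9 then
          match PySem.Str.pyGet? "ABCDEF" (r - 10) with
          | some c => [c]
          | none => []
        else (PySem.Int.toStr r).toList) := by
  by_cases hr : r ≤ 15
  · interval_cases r <;> decide
  · have h9 : r > 9 := by omega
    rw [if_pos h9, if_pos h9, dict_get?_eq_none r (by omega), str_get?_eq_none r (by omega)]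
    rfl

-- each digit produced with 0 ≤ r is at most one character, so reversing it is a no-op
theorem digit_rev (r : Int) (h0 : 0 ≤ r) :
    (if r > 9 then
        match PySem.Str.pyGet? "ABCDEF" (r - 10) with
        | some c => [c]
        | none => []
      else (PySem.Int.toStr r).toList).reverse
      = (if r > 9 then
          match PySem.Str.pyGet? "ABCDEF" (r - 10) with
          | some c => [c]
          | none => []
        else (PySem.Int.toStr r).toList) := by
  by_cases hr : r ≤ 15
  · interval_cases r <;> decide
  · have h9 : r > 9 := by omega
    rw [if_pos h9, str_get?_eq_none r (by omega)]
    rfl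

-- main invariant: B's recursion is the character-wise reverse of A's loop output
theorem conv_eq_rev_loop (q : Int) (hq : 2 ≤ q) :
    ∀ (fuel : Nat) (n : Int), n.toNat < fuel →
      convAlt q fuel n = (solutionLoop q fuel n "").toList.reverse := by
  intro fuel
  induction fuel with
  | zero => intro n h; omega
  | succ fuel ih =>
    intro n hfuel
    by_cases h : n > 0
    · have hq0 : (0 : Int) < q := by omega
      have hmodeq : PySem.Int.mod n q = n % q := PySem.Int.mod_eq_emod_of_pos hq0
      have hdiveq : PySem.Int.floordiv n q = n / q := PySem.Int.floordiv_eq_ediv_of_pos hq0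
      have hm0 : 0 ≤ PySem.Int.mod n q := by rw [hmodeq]; exact Int.emod_nonneg n (by omega)
      have hd0 : 0 ≤ PySem.Int.floordiv n q := by
        rw [hdiveq]; exact Int.ediv_nonneg (by omega) (by omega)
      have hdlt : PySem.Int.floordiv n q < n := by
        rw [PySem.Int.floordiv_lt_iff_lt_mul hq0]
        nlinarith
      have hfuel' : (PySem.Int.floordiv n q).toNat < fuel := by omega
      have hn : ¬ n ≤ 0 := by omega
      simp only [convAlt, solutionLoop, if_pos h, if_neg hn]
      rw [solutionLoop_acc q fuel _ ("" ++ _)]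
      rw [ih _ hfuel']
      simp only [String.toList_append, List.reverse_append,
        digit_lists_eq (PySem.Int.mod n q) hm0]
      rw [digit_rev (PySem.Int.mod n q) hm0]
      simp
    · have hn : n ≤ 0 := by omega
      simp [convAlt, solutionLoop, h, hn]

theorem toList_inj' {s t : String} (h : s.toList = t.toList) : s = t := by
  have := congrArg String.ofList h
  simpa using this

-- ===== VERDICT (by name: the statement is the Claim_ definition above) =====
theorem solution_spec : Claim_equal_solution := by
  intro n q _ hpre
  unfold Spec_solution
  by_cases hn : n ≤ 0
  · have h : ¬ n > 0 := by omega
    apply Prod.ext <;> apply toList_inj' <;>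
      simp [solution, solution_alt, solutionLoop, convAlt, h, hn,
        PySem.Str.slice?_none_none_neg_one]
  · rcases hpre with h | ⟨hq, _⟩
    · omega
    · have hmain := conv_eq_rev_loop q hq (n.toNat + 1) n (by omega)
      simp only [solution, solution_alt, PySem.Str.slice?_none_none_neg_one, Option.getD_some]
      apply Prod.ext <;> apply toList_inj' <;> simp [hmain]
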